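-- pv_equiv track=rewrite | github.com/thurakaungkhant1/weaviate_tipaka | scripts/build_chunks_subchunks_sentences.py | build_token_char_offsets
-- ===== SOURCE A (Python) =====
-- from typing import List, Tuple, Optional
--
-- def build_token_char_offsets(tokens: List[str]) -> List[int]:
--     """
--     Return list of char_start offsets for each token after joining with single spaces.
--     Example:
--       tokens = ["abc", "de"]
--       joined = "abc de"
--       -> offsets = [0, 4]
--     """
--     offsets = []
--     pos = 0
--     for i, tk in enumerate(tokens):
--         offsets.append(pos)
--         pos += len(tk)
--         if i < len(tokens) - 1:
--             pos += 1  # the single space between tokens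
--     return offsets
-- ===== SOURCE B (Python) =====
-- from typing import List
--
-- def build_token_char_offsets(tokens: List[str]) -> List[int]:
--     # Right-to-left suffix construction: offsets of the suffix starting at t are
--     # 0 followed by the suffix's previous offsets, all shifted by len(t)+1.
--     offsets = []
--     for t in reversed(tokens):
--         shift = len(t) + 1
--         offsets = [0] + [x + shift for x in offsets]
--     return offsets
-- ===== Notes on version B (the rewrite author's own statement) =====
-- stated objective: alternative
-- what changed: Builds the result right-to-left from suffixes: each step prepends 0 and shifts every already-computed suffix offset by len(t)+1, so there is no running position, no index, and no last-element branch.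
import Mathlib
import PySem

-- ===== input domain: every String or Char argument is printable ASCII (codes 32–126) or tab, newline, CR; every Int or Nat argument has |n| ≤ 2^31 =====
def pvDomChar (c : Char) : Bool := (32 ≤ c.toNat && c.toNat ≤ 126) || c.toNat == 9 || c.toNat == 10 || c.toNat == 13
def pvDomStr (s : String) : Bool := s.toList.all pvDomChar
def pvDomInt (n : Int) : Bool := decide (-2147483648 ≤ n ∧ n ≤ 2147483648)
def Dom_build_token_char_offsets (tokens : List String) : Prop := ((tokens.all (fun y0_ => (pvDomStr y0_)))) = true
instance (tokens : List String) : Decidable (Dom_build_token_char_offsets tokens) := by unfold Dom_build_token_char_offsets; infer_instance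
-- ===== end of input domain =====

-- B builds the offsets right-to-left from suffixes (prepend 0, shift the suffix's
-- offsets by len(t)+1) instead of A's forward scan with a running position (alternative).

-- ===== PORT A =====
def build_token_char_offsets (tokens : List String) : List Int :=
  ((PySem.List.enumerate tokens 0).foldl
    (fun (st : List Int × Int) p =>
      let offsets := st.1 ++ [st.2]
      let pos := st.2 + PySem.Str.len p.2
      let pos := if p.1 < (tokens.length : Int) - 1 then pos + 1 else pos
      (offsets, pos))
    ([], 0)).1

-- ===== PORT B =====
def build_token_char_offsets_alt (tokens : List String) : List Int :=
  tokens.reverse.foldl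
    (fun (offsets : List Int) t =>
      let shift := PySem.Str.len t + 1
      0 :: offsets.map (fun x => x + shift))
    []

-- ===== PRECONDITION & SPEC =====
def Spec_build_token_char_offsets (tokens : List String) (out : List Int) : Prop := out = build_token_char_offsets_alt tokens
instance (tokens : List String) (out : List Int) : Decidable (Spec_build_token_char_offsets tokens out) := by unfold Spec_build_token_char_offsets; infer_instance

-- ===== CLAIM (what is proved, stated in full; the proofs are below) =====
def Claim_equal_build_token_char_offsets : Prop := ∀ (tokens : List String), Dom_build_token_char_offsets tokens → Spec_build_token_char_offsets tokens (build_token_char_offsets tokens)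

-- ===== LEMMAS AND PROOFS =====

-- offsets of a token list starting at pos, with A's "add a space unless last" rule
def pvG (xs : List String) (pos : Int) : List Int :=
  match xs with
  | [] => []
  | t :: rest => pos :: pvG rest (pos + PySem.Str.len t + (if rest.isEmpty then 0 else 1))

-- B's recursive characterisation: prepend 0, shift the tail's offsets
def pvB (xs : List String) : List Int :=
  match xs with
  | [] => []
  | t :: rest => 0 :: (pvB rest).map (fun x => x + (PySem.Str.len t + 1))

theorem pvA_fold (N : Nat) :
    ∀ (xs : List String) (s : Nat) (acc : List Int) (pos : Int), s + xs.length = N →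
    ((PySem.List.enumerate xs (s : Int)).foldl
      (fun (st : List Int × Int) p =>
        let offsets := st.1 ++ [st.2]
        let pos := st.2 + PySem.Str.len p.2
        let pos := if p.1 < (N : Int) - 1 then pos + 1 else pos
        (offsets, pos))
      (acc, pos)).1 = acc ++ pvG xs pos := by
  intro xs
  induction xs with
  | nil => intro s acc pos _; simp [PySem.List.enumerate_nil, pvG]
  | cons t rest ih =>
    intro s acc pos hlen
    rw [PySem.List.enumerate_cons]
    simp only [List.foldl_cons]
    have hs : ((s : Int) + 1) = ((s + 1 : Nat) : Int) := by push_cast; ring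
    rw [hs, ih (s + 1) (acc ++ [pos]) _ (by simp at hlen ⊢; omega)]
    by_cases hr : rest.isEmpty
    · have : ¬ ((s : Int) < (N : Int) - 1) := by
        simp [List.isEmpty_iff] at hr; subst hr; simp at hlen; omega
      simp [pvG, this, hr]
    · have : (s : Int) < (N : Int) - 1 := by
        have : rest.length ≠ 0 := by simpa [List.isEmpty_iff, List.length_eq_zero_iff] using hr
        simp at hlen; omega
      simp [pvG, this, hr]

-- B's reversed foldl is exactly the suffix recursion pvB
theorem pvB_fold (xs : List String) :
    xs.reverse.foldl
      (fun (offsets : List Int) t =>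
        let shift := PySem.Str.len t + 1
        0 :: offsets.map (fun x => x + shift))
      [] = pvB xs := by
  rw [List.foldl_reverse]
  induction xs with
  | nil => rfl
  | cons t rest ih => simp only [List.foldr_cons, ih, pvB]

-- A's forward offsets starting at pos are B's suffix offsets shifted by pos
theorem pvG_eq_pvB (xs : List String) :
    ∀ (pos : Int), pvG xs pos = (pvB xs).map (fun x => x + pos) := by
  induction xs with
  | nil => intro pos; simp [pvG, pvB]
  | cons t rest ih =>
    intro pos
    cases rest with
    | nil => simp [pvG, pvB]
    | cons u rs =>
      rw [show pvG (t :: u :: rs) pos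
            = pos :: pvG (u :: rs) (pos + PySem.Str.len t + 1) from by simp [pvG],
          ih (pos + PySem.Str.len t + 1)]
      simp only [pvB, List.map_cons, List.map_map]
      congr 1
      · ring
      congr 1
      · ring
      · apply List.map_congr_left; intro x _; simp only [Function.comp_apply]; ring

-- ===== VERDICT (by name: the statement is the Claim_ definition above) =====
theorem build_token_char_offsets_spec : Claim_equal_build_token_char_offsets := by
  intro tokens _
  unfold Spec_build_token_char_offsets build_token_char_offsets build_token_char_offsets_alt
  have hA := pvA_fold tokens.length tokens 0 [] 0 (by simp)
  simp only [Int.natCast_zero] at hA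
  rw [hA, pvB_fold, List.nil_append, pvG_eq_pvB]
  simp
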